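-- pv_equiv track=rewrite | github.com/Maxime2702/INGInious | LSINF1101_adaptive/Hogwarts-II/src/CorrSort.py | multi_house_designation
-- ===== SOURCE A (Python) =====
-- from itertools import permutations
--
-- knowledge = [['Gryffindor', ['brave', 'strong', 'bold']],
--              ['Ravenclaw', ['smart', 'wise', 'curious']],
--              ['Hufflepuff', ['loyal', 'patient', 'hard-working']],
--              ['Slytherin', ['cunning', 'wily', 'malignant']]]
--
-- def multi_house_designation(student_qualities):
--     ranking = []
--     for lst in knowledge:
--         count = 0
--         for q in student_qualities:
--             if q in lst[1]:
--                 count += 1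
--         ranking.append(count)
--     ans = []
--     j = 0
--     while j < 4:
--         m = max(ranking)
--         indices = [i for i, x in enumerate(ranking) if x == m]
--         if len(ans) == 0:
--             ans = [list(x) for x in list(permutations([knowledge[i][0] for i in indices]))]
--         else:
--             tmp = []
--             for l1 in ans:
--                 for l2 in [list(x) for x in list(permutations([knowledge[i][0] for i in indices]))]:
--                     tmp.append(l1 + l2)
--             ans = tmp
--         for i in indices:
--             ranking[i] = -1
--             j += 1
--     return ans
-- ===== SOURCE B (Python) =====
-- from itertools import permutations
--
-- knowledge = [['Gryffindor', ['brave', 'strong', 'bold']],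
--              ['Ravenclaw', ['smart', 'wise', 'curious']],
--              ['Hufflepuff', ['loyal', 'patient', 'hard-working']],
--              ['Slytherin', ['cunning', 'wily', 'malignant']]]
--
-- def multi_house_designation(student_qualities):
--     counts = [sum(q in traits for q in student_qualities) for _, traits in knowledge]
--     return [[knowledge[i][0] for i in p]
--             for p in permutations(range(4))
--             if all(counts[p[k]] >= counts[p[k + 1]] for k in range(3))]
-- ===== Notes on version B (the rewrite author's own statement) =====
-- stated objective: simpler
-- what changed: Replaces A's constructive ranking loop (repeated max(), index collection, marking taken entries -1, and building the answer as a product of tie-group permutations) by generate-and-test: count matches per house once, then keep exactly those of the 24 permutations of the four houses whose count sequence is nonincreasing.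
import Mathlib
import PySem

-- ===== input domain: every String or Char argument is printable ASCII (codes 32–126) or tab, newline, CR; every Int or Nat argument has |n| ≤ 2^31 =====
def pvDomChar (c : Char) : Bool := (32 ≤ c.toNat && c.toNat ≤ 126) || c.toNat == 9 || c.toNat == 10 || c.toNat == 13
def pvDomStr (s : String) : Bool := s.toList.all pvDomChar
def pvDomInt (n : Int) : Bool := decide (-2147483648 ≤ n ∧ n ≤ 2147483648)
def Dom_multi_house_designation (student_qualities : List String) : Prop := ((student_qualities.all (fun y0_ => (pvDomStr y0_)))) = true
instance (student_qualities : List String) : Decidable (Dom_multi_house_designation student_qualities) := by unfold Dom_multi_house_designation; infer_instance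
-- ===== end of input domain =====

-- B replaces A's constructive max-and-mark while-loop (product of tie-group permutations) by
-- generate-and-test: filter the 24 permutations of the four houses for a nonincreasing count
-- sequence (simpler: no mutation, no -1 sentinels, no empty-ans special case); same return value.

-- ===== PORT A =====
-- the module constant `knowledge`
def pvKnowledge : List (String × List String) :=
  [("Gryffindor", ["brave", "strong", "bold"]),
   ("Ravenclaw", ["smart", "wise", "curious"]),
   ("Hufflepuff", ["loyal", "patient", "hard-working"]),
   ("Slytherin", ["cunning", "wily", "malignant"])]

-- [list(x) for x in list(permutations(names))]
def pvPerms (names : List String) : List (List String) :=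
  PySem.List.permutations names names.length

-- the `while j < 4` loop; j grows by ≥ 1 each pass (indices ≠ []), so 4 passes of fuel suffice
def pvLoopA : Nat → Int → List Int → List (List String) → List (List String)
  | 0, _, _, ans => ans
  | fuel+1, j, ranking, ans =>
    if j < 4 then
      match PySem.List.max? ranking (fun x => x) with
      | none => ans   -- Python max([]) raises; unreachable, ranking always has 4 entries
      | some m =>
        let indices : List Int :=
          ((PySem.List.enumerate ranking).filter (fun p => p.2 == m)).map (fun p => p.1)
        let names : List String :=
          indices.map (fun i => (PySem.List.pyGetD pvKnowledge i ("", [])).1)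
        let ans' := if ans.length = 0 then pvPerms names
                    else ans.flatMap (fun l1 => (pvPerms names).map (fun l2 => l1 ++ l2))
        let ranking' := indices.foldl (fun r i => PySem.List.pySetD r i (-1)) ranking
        pvLoopA fuel (j + indices.length) ranking' ans'
    else ans

def multi_house_designation (student_qualities : List String) : List (List String) :=
  let ranking : List Int := pvKnowledge.foldl (fun ranking lst =>
    ranking ++ [student_qualities.foldl
      (fun count q => if lst.2.contains q then count + 1 else count) (0 : Int)]) []
  pvLoopA 4 0 ranking []

-- ===== PORT B =====
-- counts, then filter itertools.permutations(range(4)) for a nonincreasing count sequence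
def multi_house_designation_alt (student_qualities : List String) : List (List String) :=
  let counts : List Int :=
    pvKnowledge.map (fun entry => (student_qualities.countP (fun q => entry.2.contains q) : Int))
  ((PySem.List.permutations (PySem.List.pyRange 0 4 1) (PySem.List.pyRange 0 4 1).length).filter
     (fun p => (PySem.List.pyRange 0 3 1).all
        (fun k => decide (PySem.List.pyGetD counts (PySem.List.pyGetD p (k + 1) 0) 0
                          ≤ PySem.List.pyGetD counts (PySem.List.pyGetD p k 0) 0)))).map
    (fun p => p.map (fun i => (PySem.List.pyGetD pvKnowledge i ("", [])).1))

-- ===== PRECONDITION & SPEC =====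
def Spec_multi_house_designation (student_qualities : List String) (out : List (List String)) : Prop := out = multi_house_designation_alt student_qualities
instance (student_qualities : List String) (out : List (List String)) : Decidable (Spec_multi_house_designation student_qualities out) := by unfold Spec_multi_house_designation; infer_instance

-- ===== CLAIM (what is proved, stated in full; the proofs are below) =====
def Claim_equal_multi_house_designation : Prop := ∀ (student_qualities : List String), Dom_multi_house_designation student_qualities → Spec_multi_house_designation student_qualities (multi_house_designation student_qualities)

-- ===== LEMMAS AND PROOFS =====

-- house name of index i
def pvName (i : Int) : String := (PySem.List.pyGetD pvKnowledge i ("", [])).1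

-- index-level tier (indices whose count equals v), its permutations, and the product step
def pvTierI (c : List Int) (v : Int) : List Int :=
  (PySem.List.pyRange 0 4 1).filter (fun i => PySem.List.pyGetD c i 0 == v)

def pvPermsI (t : List Int) : List (List Int) :=
  PySem.List.permutations t t.length

def pvStepI (c : List Int) (ans : List (List Int)) (v : Int) : List (List Int) :=
  ans.flatMap (fun a => (pvPermsI (pvTierI c v)).map (fun p => a ++ p))

-- string-level tier and step (what A's loop accumulates)
def pvTier (c : List Int) (v : Int) : List String := (pvTierI c v).map pvName

def pvStep (counts : List Int) (ans : List (List String)) (v : Int) : List (List String) :=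
  ans.flatMap (fun a => (pvPerms (pvTier counts v)).map (fun p => a ++ p))

-- the distinct nonnegative (unmarked) values of a ranking, in descending order
def pvVals (r : List Int) : List Int :=
  PySem.List.sorted (PySem.Set.ofList (r.filter (fun x => 0 ≤ x))) (fun v => v) true

-- B's filtered permutation list at the index level
def pvFilterI (c : List Int) : List (List Int) :=
  (PySem.List.permutations (PySem.List.pyRange 0 4 1) (PySem.List.pyRange 0 4 1).length).filter
    (fun p => (PySem.List.pyRange 0 3 1).all
       (fun k => decide (PySem.List.pyGetD c (PySem.List.pyGetD p (k + 1) 0) 0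
                         ≤ PySem.List.pyGetD c (PySem.List.pyGetD p k 0) 0)))

-- the rank of x among the entries of c (number of entries strictly below x)
def pvPhi (c : List Int) (x : Int) : Int := ((c.countP (fun y => decide (y < x)) : Nat) : Int)

-- A's marking pass, as a map
def pvMark (r : List Int) (m : Int) : List Int := r.map (fun x => if x == m then -1 else x)

-- A's index list, as a filtered range
def pvIdx (r : List Int) (m : Int) : List Int :=
  (PySem.List.pyRange 0 4 1).filter (fun j => PySem.List.pyGetD r j 0 == m)

theorem perms_ne_nil (l : List String) : pvPerms l ≠ [] := by
  unfold pvPerms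
  induction l with
  | nil => decide
  | cons x xs ih =>
    show PySem.List.permutations (x :: xs) (xs.length + 1) ≠ []
    rw [PySem.List.permutations]
    simp only [ne_eq, List.flatMap_eq_nil_iff, not_forall]
    refine ⟨0, by simp, ?_⟩
    simp [ih]

theorem indicesA_eq (r : List Int) (h4 : r.length = 4) (m : Int) :
    ((PySem.List.enumerate r).filter (fun p => p.2 == m)).map (fun p => p.1) = pvIdx r m := by
  rw [PySem.List.enumerate_eq_map_pyRange r 0, List.filter_map, List.map_map]
  unfold pvIdx
  have hl : PySem.List.len r = (4 : Int) := by simp [PySem.List.len_eq, h4]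
  rw [hl]
  simp [Function.comp_def]

theorem foldl_pySetD_getElem? (I : List Int) (v : Int) (r : List Int) (k : Nat)
    (hI : ∀ i ∈ I, 0 ≤ i ∧ i < (r.length : Int)) :
    (I.foldl (fun r i => PySem.List.pySetD r i v) r)[k]? =
      if (k : Int) ∈ I then (if k < r.length then some v else none) else r[k]? := by
  induction I generalizing r with
  | nil => simp
  | cons i I' ih =>
    have hi := hI i (List.mem_cons_self ..)
    have hlen : (PySem.List.pySetD r i v).length = r.length := PySem.List.length_pySetD ..
    rw [List.foldl_cons, ih _ (by intro j hj; rw [hlen]; exact hI j (List.mem_cons_of_mem _ hj))]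
    rw [hlen]
    by_cases hmem : (k : Int) ∈ I'
    · simp [hmem]
    · simp only [hmem, if_false, List.mem_cons]
      by_cases hk : (k : Int) = i
      · have hki : k = i.toNat := by omega
        rw [PySem.List.pySetD_of_nonneg _ _ hi.1, if_pos (Or.inl hk)]
        rw [List.getElem?_set, if_pos hki.symm]
        have hkl : i.toNat < r.length := by omega
        rw [if_pos hkl, if_pos (by omega)]
      · rw [if_neg (by tauto)]
        rw [PySem.List.pySetD_of_nonneg _ _ hi.1]
        rw [List.getElem?_set_ne (by omega)]

theorem mem_pvIdx (r : List Int) (m : Int) (k : Nat) :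
    (k : Int) ∈ pvIdx r m ↔ k < 4 ∧ r.getD k 0 = m := by
  unfold pvIdx
  rw [List.mem_filter, PySem.List.mem_pyRange_one]
  simp only [PySem.List.pyGetD_natCast, beq_iff_eq]
  constructor
  · rintro ⟨⟨-, h2⟩, h3⟩; exact ⟨by omega, h3⟩
  · rintro ⟨h1, h2⟩; exact ⟨⟨by omega, by omega⟩, h2⟩

theorem mark_eq (r : List Int) (h4 : r.length = 4) (m : Int) :
    (pvIdx r m).foldl (fun r i => PySem.List.pySetD r i (-1)) r = pvMark r m := by
  have hlen : ∀ i ∈ pvIdx r m, 0 ≤ i ∧ i < (r.length : Int) := by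
    intro i hi
    have := (List.mem_filter.mp hi).1
    rw [PySem.List.mem_pyRange_one] at this
    omega
  apply List.ext_getElem?
  intro k
  rw [foldl_pySetD_getElem? _ _ _ _ hlen]
  simp only [mem_pvIdx]
  unfold pvMark
  rw [List.getElem?_map]
  by_cases hk : k < r.length
  · have hget : r[k]? = some r[k] := List.getElem?_eq_getElem hk
    have hgetD : r.getD k 0 = r[k] := List.getD_eq_getElem r 0 hk
    rw [hget, hgetD]
    have hk4 : k < 4 := by omega
    by_cases hm : r[k] = m
    · simp [hm, hk, hk4]
    · simp [hm, hk4]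
  · have hget : r[k]? = none := List.getElem?_eq_none (by omega)
    rw [hget, if_neg (by omega)]
    rfl

theorem mem_pvVals (s : List Int) (x : Int) : x ∈ pvVals s ↔ x ∈ s ∧ 0 ≤ x := by
  unfold pvVals
  rw [PySem.List.mem_sorted, PySem.Set.mem_ofList, List.mem_filter]
  simp

theorem pvVals_step (r : List Int) (m : Int) (hm0 : 0 ≤ m) (hmem : m ∈ r)
    (hmax : ∀ x ∈ r, x ≤ m) : pvVals r = m :: pvVals (pvMark r m) := by
  have hmemT : ∀ x, x ∈ pvVals (pvMark r m) ↔ x ∈ r ∧ 0 ≤ x ∧ x ≠ m := by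
    intro x
    rw [mem_pvVals]
    unfold pvMark
    rw [List.mem_map]
    constructor
    · rintro ⟨⟨y, hy, hyx⟩, hx0⟩
      by_cases hym : y = m
      · exfalso; rw [if_pos (by simpa using hym)] at hyx; omega
      · rw [if_neg (by simpa using hym)] at hyx; subst hyx; exact ⟨hy, hx0, hym⟩
    · rintro ⟨hx, hx0, hxm⟩
      exact ⟨⟨x, hx, by rw [if_neg (by simpa using hxm)]⟩, hx0⟩
  have hndT : (pvVals (pvMark r m)).Nodup :=
    (PySem.List.sorted_perm _ _ _).symm.nodup (PySem.Set.nodup_ofList _)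
  have hmT : m ∉ pvVals (pvMark r m) := by
    intro hm
    exact ((hmemT m).mp hm).2.2 rfl
  show PySem.List.sorted (PySem.Set.ofList (r.filter (fun x => 0 ≤ x))) (fun v => v) true
      = m :: pvVals (pvMark r m)
  apply PySem.List.sorted_rev_eq_of_perm_of_pairwise_gt
  · -- permutation
    apply List.perm_of_nodup_nodup_toFinset_eq
    · exact List.nodup_cons.mpr ⟨hmT, hndT⟩
    · exact PySem.Set.nodup_ofList _
    · ext x
      simp only [List.mem_toFinset, List.mem_cons, PySem.Set.mem_ofList, List.mem_filter,
        decide_eq_true_eq]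
      rw [hmemT]
      constructor
      · rintro (rfl | ⟨hx, hx0, -⟩)
        · exact ⟨hmem, hm0⟩
        · exact ⟨hx, hx0⟩
      · rintro ⟨hx, hx0⟩
        by_cases hxm : x = m
        · exact Or.inl hxm
        · exact Or.inr ⟨hx, hx0, hxm⟩
  · -- descending, strictly
    rw [List.pairwise_cons]
    constructor
    · intro x hx
      have := (hmemT x).mp hx
      have := hmax x this.1
      have hne := ((hmemT x).mp hx).2.2
      omega
    · have h1 : (pvVals (pvMark r m)).Pairwise (fun a b => b ≤ a) :=
        PySem.List.sorted_pairwise_rev _ _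
      have h2 : (pvVals (pvMark r m)).Pairwise (fun a b => a ≠ b) := hndT
      exact (h1.and h2).imp (fun h => by omega)

theorem tierI_mark (r : List Int) (h4 : r.length = 4) (m v : Int) (hv : 0 ≤ v) (hne : v ≠ m) :
    pvTierI (pvMark r m) v = pvTierI r v := by
  unfold pvTierI
  apply List.filter_congr
  intro i hi
  rw [PySem.List.mem_pyRange_one] at hi
  have hlen : (pvMark r m).length = r.length := by simp [pvMark]
  have h1 : PySem.List.pyGetD (pvMark r m) i 0 =
      if (PySem.List.pyGetD r i 0) == m then -1 else PySem.List.pyGetD r i 0 := by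
    rw [PySem.List.pyGetD_eq_getElem (pvMark r m) 0 hi.1 (by rw [hlen]; omega),
        PySem.List.pyGetD_eq_getElem r 0 hi.1 (by omega)]
    unfold pvMark
    rw [List.getElem_map]
  rw [h1]
  by_cases hm : (PySem.List.pyGetD r i 0) = m
  · have : (PySem.List.pyGetD r i 0 == m) = true := by simpa using hm
    rw [this, if_pos rfl]
    have e1 : ((-1 : Int) == v) = false := by simp; omega
    have e2 : (PySem.List.pyGetD r i 0 == v) = false := by simp [hm]; omega
    rw [e1, e2]
  · have : (PySem.List.pyGetD r i 0 == m) = false := by simpa using hm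
    rw [this]
    simp

theorem tier_mark (r : List Int) (h4 : r.length = 4) (m v : Int) (hv : 0 ≤ v) (hne : v ≠ m) :
    pvTier (pvMark r m) v = pvTier r v := by
  unfold pvTier
  rw [tierI_mark r h4 m v hv hne]

theorem countP_mark (r : List Int) (m : Int) (hm : 0 ≤ m) :
    (pvMark r m).countP (fun x => x == -1) =
      r.countP (fun x => x == -1) + r.countP (fun x => x == m) := by
  induction r with
  | nil => rfl
  | cons x xs ih =>
    simp only [pvMark, List.map_cons, List.countP_cons] at ih ⊢
    cases hx : (x == m) with
    | true =>
      have hxm : x = m := by simpa using hx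
      have h1 : (x == -1) = false := by simp; omega
      simp only [if_true, h1, ih]
      simp; omega
    | false =>
      simp only [Bool.false_eq_true, if_false, ih]
      by_cases h1 : x = -1
      · simp [h1]; omega
      · simp [h1]

theorem pvIdx_length (r : List Int) (h4 : r.length = 4) (m : Int) :
    (pvIdx r m).length = r.countP (fun x => x == m) := by
  unfold pvIdx
  rw [← List.countP_eq_length_filter]
  have h := PySem.List.map_pyGetD_pyRange_zero' r 0
  rw [h4] at h
  conv_rhs => rw [← h]
  rw [List.countP_map]
  rfl

theorem pvLoopA_core : ∀ (fuel : Nat) (r : List Int) (ans : List (List String)),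
    r.length = 4 → (∀ x ∈ r, x = -1 ∨ 0 ≤ x) →
    (pvVals r).length ≤ fuel →
    (ans = [] → r.countP (fun x => x == -1) < 4) →
    pvLoopA fuel (r.countP (fun x => x == -1) : Int) r ans
      = (pvVals r).foldl (pvStep r) (if ans = [] then [[]] else ans) := by
  intro fuel
  induction fuel with
  | zero =>
    intro r ans h4 hinv hfuel hans
    have hv : pvVals r = [] := List.length_eq_zero_iff.mp (by omega)
    have hall : ∀ x ∈ r, x = -1 := by
      intro x hx
      rcases hinv x hx with h | h
      · exact h
      · exfalso
        have : x ∈ pvVals r := (mem_pvVals r x).mpr ⟨hx, h⟩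
        rw [hv] at this
        exact absurd this (List.not_mem_nil)
    have hcnt : r.countP (fun x => x == -1) = 4 := by
      rw [List.countP_eq_length.mpr (fun a ha => by simp [hall a ha]), h4]
    have hne : ans ≠ [] := fun he => by have := hans he; omega
    rw [hv]
    simp [pvLoopA, hne]
  | succ fuel ih =>
    intro r ans h4 hinv hfuel hans
    by_cases hc : r.countP (fun x => x == -1) = 4
    · -- all four entries already -1: Python's j = 4, the loop exits
      have hall : ∀ x ∈ r, x = -1 := by
        have h := List.countP_eq_length.mp (by rw [hc, ← h4])
        intro x hx
        simpa using h x hx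
      have hv : pvVals r = [] := by
        rw [List.eq_nil_iff_forall_not_mem]
        intro x hx
        have h1 := (mem_pvVals r x).mp hx
        have h2 := hall x h1.1
        omega
      have hne : ans ≠ [] := fun he => by have := hans he; omega
      rw [hc, hv]
      show pvLoopA (fuel+1) ((4:Nat) : Int) r ans = _
      rw [pvLoopA]
      rw [if_neg (by norm_num)]
      simp [hne]
    · -- the loop body runs once, on the current maximum m
      have hcle : r.countP (fun x => x == -1) ≤ 4 := h4 ▸ List.countP_le_length
      have hlt : r.countP (fun x => x == -1) < 4 := by omega
      have hex : ∃ x ∈ r, 0 ≤ x := by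
        by_contra hno
        push Not at hno
        have hall : ∀ x ∈ r, (x == -1) = true := by
          intro x hx
          rcases hinv x hx with h | h
          · simp [h]
          · exact absurd h (by simpa using hno x hx)
        have := List.countP_eq_length.mpr hall
        omega
      have hrne : r ≠ [] := by intro h; rw [h] at h4; simp at h4
      obtain ⟨m, hm⟩ : ∃ m, PySem.List.max? r (fun x => x) = some m := by
        cases hmx : PySem.List.max? r (fun x => x) with
        | none => exact absurd ((PySem.List.max?_eq_none_iff r _).mp hmx) hrne
        | some m => exact ⟨m, rfl⟩
      have hmmem : m ∈ r := PySem.List.max?_mem hm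
      have hmax : ∀ x ∈ r, x ≤ m := fun x hx => PySem.List.max?_isMax hm x hx
      have hm0 : 0 ≤ m := by
        obtain ⟨x, hx, hx0⟩ := hex
        have := hmax x hx
        omega
      rw [pvLoopA]
      rw [if_pos (by exact_mod_cast hlt), hm]
      simp only [indicesA_eq r h4 m, mark_eq r h4 m]
      have hnames : ((pvIdx r m).map (fun i => (PySem.List.pyGetD pvKnowledge i ("", [])).1))
          = pvTier r m := rfl
      rw [hnames]
      have hj : ((r.countP (fun x => x == -1) : Int) + ((pvIdx r m).length : Int))
          = ((pvMark r m).countP (fun x => x == -1) : Int) := by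
        rw [pvIdx_length r h4, countP_mark r m hm0]
        push_cast
        ring
      rw [hj]
      -- the new accumulator is pvStep r (old accumulator') m in both branches
      have hstep : (if ans.length = 0 then pvPerms (pvTier r m)
            else ans.flatMap (fun l1 => (pvPerms (pvTier r m)).map (fun l2 => l1 ++ l2)))
          = pvStep r (if ans = [] then [[]] else ans) m := by
        by_cases hnil : ans = []
        · subst hnil
          simp [pvStep]
        · rw [if_neg (by simpa using hnil), if_neg hnil]
          rfl
      rw [hstep]
      have hstepne : pvStep r (if ans = [] then [[]] else ans) m ≠ [] := by
        unfold pvStep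
        set base := if ans = [] then [[]] else ans with hbase
        have hbne : base ≠ [] := by
          by_cases hnil : ans = [] <;> simp [hbase, hnil]
        obtain ⟨a, ha⟩ := List.exists_mem_of_ne_nil base hbne
        simp only [ne_eq, List.flatMap_eq_nil_iff, not_forall]
        exact ⟨a, ha, by simp [perms_ne_nil]⟩
      -- invariants for the marked ranking
      have h4' : (pvMark r m).length = 4 := by simp [pvMark, h4]
      have hinv' : ∀ x ∈ pvMark r m, x = -1 ∨ 0 ≤ x := by
        intro x hx
        simp only [pvMark, List.mem_map] at hx
        obtain ⟨y, hy, rfl⟩ := hx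
        by_cases hym : y = m
        · simp [hym]
        · rw [if_neg (by simpa using hym)]
          exact hinv y hy
      have hvals : pvVals r = m :: pvVals (pvMark r m) := pvVals_step r m hm0 hmmem hmax
      have hfuel' : (pvVals (pvMark r m)).length ≤ fuel := by
        have := hfuel
        rw [hvals] at this
        simpa using this
      have hih := ih (pvMark r m) (pvStep r (if ans = [] then [[]] else ans) m)
        h4' hinv' hfuel' (fun h => absurd h hstepne)
      rw [if_neg hstepne] at hih
      rw [hih, hvals, List.foldl_cons]
      -- on the remaining (smaller, nonnegative) values the tiers of r and of the marked r agree
      apply PySem.List.foldl_congr_mem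
      intro acc v hv
      have hv' := (mem_pvVals _ v).mp hv
      have hvne : v ≠ m := by
        obtain ⟨y, hy, hyv⟩ := List.mem_map.mp hv'.1
        by_cases hym : y = m
        · exfalso
          rw [if_pos (by simpa using hym)] at hyv
          have := hv'.2
          omega
        · rw [if_neg (by simpa using hym)] at hyv
          subst hyv
          exact hym
      unfold pvStep
      rw [tier_mark r h4 m v hv'.2 hvne]

-- ===== bridge: string-level product fold = index-level product fold, mapped through pvName =====

theorem pvPermutations_map (f : Int → String) : ∀ (r : Nat) (xs : List Int),
    PySem.List.permutations (xs.map f) r = (PySem.List.permutations xs r).map (List.map f) := by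
  intro r
  induction r with
  | zero => intro xs; rfl
  | succ r ih =>
    intro xs
    rw [PySem.List.permutations, PySem.List.permutations]
    rw [List.map_flatMap, List.length_map]
    congr 1
    funext i
    rw [List.getElem?_map]
    cases h : xs[i]? with
    | none => rfl
    | some x =>
      simp only [Option.map_some]
      rw [List.eraseIdx_map, ih]
      simp [List.map_map, Function.comp_def]

theorem pvStep_map (c : List Int) : ∀ (vs : List Int) (acc : List (List Int)),
    vs.foldl (pvStep c) (acc.map (List.map pvName))
      = (vs.foldl (pvStepI c) acc).map (List.map pvName) := by
  intro vs
  induction vs with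
  | nil => intro acc; rfl
  | cons v vs ih =>
    intro acc
    rw [List.foldl_cons, List.foldl_cons, ← ih]
    congr 1
    unfold pvStep pvStepI pvPerms
    rw [show pvTier c v = (pvTierI c v).map pvName from rfl]
    rw [List.length_map, pvPermutations_map]
    rw [show (pvTierI c v).length = (pvPermsI (pvTierI c v)).length / 1 * 1 + (pvTierI c v).length - (pvPermsI (pvTierI c v)).length / 1 * 1 from by omega]
    simp [pvPermsI, List.flatMap_map, List.map_flatMap, List.map_map, Function.comp_def]

-- ===== rank reduction: both sides depend only on the order pattern of the counts =====

theorem pvCountP_lt {l : List Int} {p q : Int → Bool} (himp : ∀ a ∈ l, p a = true → q a = true)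
    {b : Int} (hb : b ∈ l) (hpb : p b = false) (hqb : q b = true) :
    l.countP p < l.countP q := by
  induction l with
  | nil => exact absurd hb (List.not_mem_nil)
  | cons x xs ih =>
    rw [List.countP_cons, List.countP_cons]
    have hmono : xs.countP p ≤ xs.countP q :=
      List.countP_mono_left (fun a ha => himp a (List.mem_cons_of_mem _ ha))
    rcases List.mem_cons.mp hb with rfl | hb'
    · rw [hpb, hqb]
      simp
      omega
    · have hlt : xs.countP p < xs.countP q :=
        ih (fun a ha h => himp a (List.mem_cons_of_mem _ ha) h) hb'
      have hx : (if p x = true then 1 else 0) ≤ (if q x = true then 1 else 0) := by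
        by_cases hpx : p x = true
        · rw [if_pos hpx, if_pos (himp x (List.mem_cons_self ..) hpx)]
        · rw [if_neg hpx]
          split <;> omega
      omega

theorem pvPhi_lt {c : List Int} {x y : Int} (hx : x ∈ c) (hxy : x < y) :
    pvPhi c x < pvPhi c y := by
  unfold pvPhi
  have := pvCountP_lt (l := c) (p := fun z => decide (z < x)) (q := fun z => decide (z < y))
    (fun a _ h => by simp at h ⊢; omega) hx (by simp) (by simp [hxy])
  omega

theorem pvPhi_le_iff {c : List Int} {x y : Int} (hx : x ∈ c) (hy : y ∈ c) :
    pvPhi c x ≤ pvPhi c y ↔ x ≤ y := by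
  constructor
  · intro h
    by_contra hlt
    have := pvPhi_lt hy (by omega : y < x)
    omega
  · intro h
    rcases eq_or_lt_of_le h with rfl | hlt
    · exact le_refl _
    · exact le_of_lt (pvPhi_lt hx hlt)

theorem pvPhi_eq_iff {c : List Int} {x y : Int} (hx : x ∈ c) (hy : y ∈ c) :
    pvPhi c x = pvPhi c y ↔ x = y := by
  constructor
  · intro h
    have h1 := (pvPhi_le_iff hx hy).mp (le_of_eq h)
    have h2 := (pvPhi_le_iff hy hx).mp (le_of_eq h.symm)
    omega
  · rintro rfl; rfl

theorem pvPhi_nonneg (c : List Int) (x : Int) : 0 ≤ pvPhi c x := Int.natCast_nonneg _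

theorem pvPhi_lt_length {c : List Int} {x : Int} (hx : x ∈ c) :
    pvPhi c x < (c.length : Int) := by
  unfold pvPhi
  have := pvCountP_lt (l := c) (p := fun z => decide (z < x)) (q := fun _ => true)
    (fun a _ _ => rfl) hx (by simp) rfl
  rw [List.countP_true] at this
  omega

theorem pvInRange (n : Nat) (i : Int) (h1 : -(n : Int) ≤ i) (h2 : i < (n : Int)) :
    PySem.Raise.InRange n i := And.intro h1 h2

theorem pvGetD_map_phi (c : List Int) (h4 : c.length = 4) (i : Int) (h0 : 0 ≤ i) (hi : i < 4) :
    PySem.List.pyGetD (c.map (pvPhi c)) i 0 = pvPhi c (PySem.List.pyGetD c i 0) := by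
  rw [PySem.List.pyGetD_eq_getElem (c.map (pvPhi c)) 0 h0 (by simp [h4]; omega),
      PySem.List.pyGetD_eq_getElem c 0 h0 (by omega)]
  rw [List.getElem_map]

theorem tierI_phi (c : List Int) (h4 : c.length = 4) (v : Int) (hv : v ∈ c) :
    pvTierI (c.map (pvPhi c)) (pvPhi c v) = pvTierI c v := by
  unfold pvTierI
  apply List.filter_congr
  intro i hi
  rw [PySem.List.mem_pyRange_one] at hi
  rw [pvGetD_map_phi c h4 i hi.1 hi.2]
  have hm : PySem.List.pyGetD c i 0 ∈ c :=
    PySem.List.pyGetD_mem c 0 (pvInRange _ _ (by omega) (by omega))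
  rw [Bool.eq_iff_iff]
  simp only [beq_iff_eq]
  exact pvPhi_eq_iff hm hv

theorem pvVals_phi (c : List Int) (hpos : ∀ x ∈ c, 0 ≤ x) :
    pvVals (c.map (pvPhi c)) = (pvVals c).map (pvPhi c) := by
  unfold pvVals
  rw [List.filter_eq_self.mpr (by
        intro x hx
        obtain ⟨y, -, rfl⟩ := List.mem_map.mp hx
        simpa using pvPhi_nonneg c y),
      List.filter_eq_self.mpr (by intro x hx; simpa using hpos x hx)]
  have hSperm : (PySem.List.sorted (PySem.Set.ofList c) (fun v => v) true).Perm
      (PySem.Set.ofList c) := PySem.List.sorted_perm _ _ _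
  have hSnodup : (PySem.List.sorted (PySem.Set.ofList c) (fun v => v) true).Nodup :=
    hSperm.symm.nodup (PySem.Set.nodup_ofList _)
  have hSmem : ∀ x, x ∈ PySem.List.sorted (PySem.Set.ofList c) (fun v => v) true ↔ x ∈ c := by
    intro x
    rw [PySem.List.mem_sorted, PySem.Set.mem_ofList]
  have hSgt : (PySem.List.sorted (PySem.Set.ofList c) (fun v => v) true).Pairwise
      (fun a b => b < a) := by
    have h1 : (PySem.List.sorted (PySem.Set.ofList c) (fun v => v) true).Pairwise
        (fun a b => b ≤ a) := PySem.List.sorted_pairwise_rev _ _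
    have h2 : (PySem.List.sorted (PySem.Set.ofList c) (fun v => v) true).Pairwise
        (fun a b => a ≠ b) := hSnodup
    exact (h1.and h2).imp (fun h => by omega)
  apply PySem.List.sorted_rev_eq_of_perm_of_pairwise_gt
  · -- permutation with the distinct entries of c.map φ
    apply List.perm_of_nodup_nodup_toFinset_eq
    · refine List.Nodup.map_on ?_ hSnodup
      intro x hx y hy hxy
      exact (pvPhi_eq_iff ((hSmem x).mp hx) ((hSmem y).mp hy)).mp hxy
    · exact PySem.Set.nodup_ofList _
    · ext z
      simp only [List.mem_toFinset, List.mem_map, PySem.Set.mem_ofList]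
      constructor
      · rintro ⟨y, hy, rfl⟩
        exact ⟨y, (hSmem y).mp hy, rfl⟩
      · rintro ⟨y, hy, rfl⟩
        exact ⟨y, (hSmem y).mpr hy, rfl⟩
  · -- strictly descending after mapping through the rank
    rw [List.pairwise_map]
    refine List.Pairwise.imp_of_mem ?_ hSgt
    intro a b ha hb hba
    exact pvPhi_lt ((hSmem b).mp hb) hba

theorem filterI_phi (c : List Int) (h4 : c.length = 4) :
    pvFilterI (c.map (pvPhi c)) = pvFilterI c := by
  unfold pvFilterI
  apply List.filter_congr
  intro p hp
  have hperm : p.Perm (PySem.List.pyRange 0 4 1) :=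
    PySem.List.perm_of_mem_permutations hp
  have hplen : p.length = 4 := by
    rw [hperm.length_eq, PySem.List.length_pyRange_one]
    rfl
  have hpmem : ∀ i ∈ p, 0 ≤ i ∧ i < 4 := by
    intro i hi
    have := hperm.mem_iff.mp hi
    rw [PySem.List.mem_pyRange_one] at this
    exact this
  rw [Bool.eq_iff_iff]
  simp only [List.all_eq_true]
  apply forall_congr'
  intro k
  apply imp_congr_right
  intro hk
  rw [PySem.List.mem_pyRange_one] at hk
  have hi1 : PySem.List.pyGetD p k 0 ∈ p :=
    PySem.List.pyGetD_mem p 0 (pvInRange _ _ (by omega) (by omega))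
  have hi2 : PySem.List.pyGetD p (k + 1) 0 ∈ p :=
    PySem.List.pyGetD_mem p 0 (pvInRange _ _ (by omega) (by omega))
  have h1 := hpmem _ hi1
  have h2 := hpmem _ hi2
  rw [pvGetD_map_phi c h4 _ h1.1 h1.2, pvGetD_map_phi c h4 _ h2.1 h2.2]
  have hm1 : PySem.List.pyGetD c (PySem.List.pyGetD p k 0) 0 ∈ c :=
    PySem.List.pyGetD_mem c 0 (pvInRange _ _ (by omega) (by omega))
  have hm2 : PySem.List.pyGetD c (PySem.List.pyGetD p (k + 1) 0) 0 ∈ c :=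
    PySem.List.pyGetD_mem c 0 (pvInRange _ _ (by omega) (by omega))
  simp only [decide_eq_true_eq]
  exact pvPhi_le_iff hm2 hm1

-- the equality for every length-4 count vector with entries in 0..3, by computation
theorem pvCoreFin : ∀ (a b c d : Fin 4),
    (pvVals [((a : Nat) : Int), ((b : Nat) : Int), ((c : Nat) : Int), ((d : Nat) : Int)]).foldl
      (pvStepI [((a : Nat) : Int), ((b : Nat) : Int), ((c : Nat) : Int), ((d : Nat) : Int)]) [[]]
    = pvFilterI [((a : Nat) : Int), ((b : Nat) : Int), ((c : Nat) : Int), ((d : Nat) : Int)] := by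
  decide

theorem pvCoreI (c : List Int) (h4 : c.length = 4) (hpos : ∀ x ∈ c, 0 ≤ x) :
    (pvVals c).foldl (pvStepI c) [[]] = pvFilterI c := by
  have hstep1 : (pvVals c).foldl (pvStepI c) [[]]
      = (pvVals (c.map (pvPhi c))).foldl (pvStepI (c.map (pvPhi c))) [[]] := by
    rw [pvVals_phi c hpos, List.foldl_map]
    apply (PySem.List.foldl_congr_mem _ _ _ _ ?_).symm
    intro acc v hv
    unfold pvStepI
    rw [tierI_phi c h4 v ((mem_pvVals c v).mp hv).1]
  rw [hstep1, ← filterI_phi c h4]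
  -- the mapped count vector has entries in 0..3: instantiate the computed lemma
  match c, h4 with
  | [c0, c1, c2, c3], _ =>
    have hb : ∀ x ∈ [c0, c1, c2, c3], (pvPhi [c0, c1, c2, c3] x).toNat < 4 := by
      intro x hx
      have h1 := pvPhi_lt_length hx
      have h2 := pvPhi_nonneg [c0, c1, c2, c3] x
      simp at h1
      omega
    have e : ∀ x ∈ [c0, c1, c2, c3],
        pvPhi [c0, c1, c2, c3] x = (((pvPhi [c0, c1, c2, c3] x).toNat : Nat) : Int) := by
      intro x hx
      have := pvPhi_nonneg [c0, c1, c2, c3] x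
      omega
    have hmap : [c0, c1, c2, c3].map (pvPhi [c0, c1, c2, c3])
        = [(((⟨(pvPhi [c0, c1, c2, c3] c0).toNat, hb c0 (by simp)⟩ : Fin 4) : Nat) : Int),
           (((⟨(pvPhi [c0, c1, c2, c3] c1).toNat, hb c1 (by simp)⟩ : Fin 4) : Nat) : Int),
           (((⟨(pvPhi [c0, c1, c2, c3] c2).toNat, hb c2 (by simp)⟩ : Fin 4) : Nat) : Int),
           (((⟨(pvPhi [c0, c1, c2, c3] c3).toNat, hb c3 (by simp)⟩ : Fin 4) : Nat) : Int)] := by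
      simp only [List.map_cons, List.map_nil]
      rw [e c0 (by simp), e c1 (by simp), e c2 (by simp), e c3 (by simp)]
      rfl
    rw [hmap]
    exact pvCoreFin _ _ _ _

-- ===== VERDICT (by name: the statement is the Claim_ definition above) =====
theorem multi_house_designation_spec : Claim_equal_multi_house_designation := by
  unfold Claim_equal_multi_house_designation
  intro qs _
  unfold Spec_multi_house_designation multi_house_designation multi_house_designation_alt
  have hcounts : (pvKnowledge.foldl (fun ranking lst => ranking ++
        [qs.foldl (fun count q => if lst.2.contains q then count + 1 else count) (0:Int)]) [])
      = pvKnowledge.map (fun entry => (qs.countP (fun q => entry.2.contains q) : Int)) := by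
    rw [PySem.List.foldl_append_singleton_eq_map]
    rw [List.nil_append]
    apply List.map_congr_left
    intro lst _
    rw [PySem.List.foldl_count_if]
    rw [Int.zero_add]
  simp only [hcounts]
  set counts := pvKnowledge.map (fun entry => (qs.countP (fun q => entry.2.contains q) : Int))
    with hcdef
  have h4 : counts.length = 4 := by rw [hcdef]; rfl
  have hpos : ∀ x ∈ counts, 0 ≤ x := by
    intro x hx
    rw [hcdef, List.mem_map] at hx
    obtain ⟨e, -, rfl⟩ := hx
    exact Int.natCast_nonneg _
  have hinv : ∀ x ∈ counts, x = -1 ∨ 0 ≤ x := fun x hx => Or.inr (hpos x hx)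
  have hcnt0 : counts.countP (fun x => x == -1) = 0 := by
    rw [List.countP_eq_zero]
    intro x hx
    have := hpos x hx
    simp
    omega
  have hfuel : (pvVals counts).length ≤ 4 := by
    unfold pvVals
    rw [PySem.List.length_sorted]
    calc (PySem.Set.ofList (counts.filter (fun x => 0 ≤ x))).length
        ≤ (counts.filter (fun x => 0 ≤ x)).length := PySem.Set.length_ofList_le _
      _ ≤ counts.length := List.length_filter_le _ _
      _ = 4 := h4
  have hcore := pvLoopA_core 4 counts [] h4 hinv hfuel (fun _ => by omega)
  rw [hcnt0] at hcore
  have hz : ((0:Nat) : Int) = (0 : Int) := rfl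
  rw [hz] at hcore
  rw [hcore]
  rw [if_pos rfl]
  have hmapnil : ([[]] : List (List String)) = ([[]] : List (List Int)).map (List.map pvName) := rfl
  rw [hmapnil, pvStep_map counts (pvVals counts) [[]]]
  rw [pvCoreI counts h4 hpos]
  rfl
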